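-- pv_equiv track=rewrite | github.com/derekmerck/storytangl | engine/src/tangl/mechanics/progression/challenges/resolution.py | _remap_wallet
-- ===== SOURCE A (Python) =====
-- from collections.abc import Iterable, Mapping
--
-- def _remap_wallet(
--     wallet_map: Mapping[str, int],
--     remap_chain: Iterable[Mapping[str, str]],
-- ) -> dict[str, int]:
--     remapped = dict(wallet_map)
--     for remap in remap_chain:
--         next_map: dict[str, int] = {}
--         for currency, amount in remapped.items():
--             target = remap.get(currency, currency)
--             next_map[target] = next_map.get(target, 0) + amount
--         remapped = next_map
--     return remapped
-- ===== SOURCE B (Python) =====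
-- def _remap_wallet(wallet_map, remap_chain):
--     # Track only where each wallet currency ends up: compose the remap chain over
--     # the wallet's keys, then aggregate the amounts in a single final pass.
--     targets = {c: c for c in wallet_map}
--     for remap in remap_chain:
--         targets = {c: remap.get(t, t) for c, t in targets.items()}
--     result = {}
--     for currency, amount in wallet_map.items():
--         target = targets.get(currency, currency)
--         result[target] = result.get(target, 0) + amount
--     return result
-- ===== Notes on version B (the rewrite author's own statement) =====
-- stated objective: alternative
-- what changed: Instead of re-building and re-aggregating the whole wallet dict once per remap in the chain, B composes the chain over the wallet's currencies into a single currency->final-target map and then aggregates the amounts in one final pass.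
import Mathlib
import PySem

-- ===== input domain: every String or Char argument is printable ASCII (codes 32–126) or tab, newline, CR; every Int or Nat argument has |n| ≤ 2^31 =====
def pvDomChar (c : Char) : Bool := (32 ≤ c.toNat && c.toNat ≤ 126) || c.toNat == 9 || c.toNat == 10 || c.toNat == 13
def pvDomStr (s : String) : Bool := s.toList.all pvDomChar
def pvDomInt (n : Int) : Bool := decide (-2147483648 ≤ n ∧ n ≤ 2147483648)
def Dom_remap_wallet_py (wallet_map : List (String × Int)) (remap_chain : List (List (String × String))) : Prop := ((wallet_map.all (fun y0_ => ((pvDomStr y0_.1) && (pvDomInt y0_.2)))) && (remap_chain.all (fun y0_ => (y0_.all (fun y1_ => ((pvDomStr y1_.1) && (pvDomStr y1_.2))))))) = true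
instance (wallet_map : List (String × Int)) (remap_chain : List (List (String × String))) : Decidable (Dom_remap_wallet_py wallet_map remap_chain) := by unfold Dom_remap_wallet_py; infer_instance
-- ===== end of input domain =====

-- B composes the remap chain over the wallet's currencies into one final-target map and then
-- aggregates the amounts in a single pass, instead of re-aggregating the wallet dict once per
-- remap as A does (objective: alternative).

-- ===== PORT A =====
def remap_wallet_py (wallet_map : List (String × Int)) (remap_chain : List (List (String × String))) : List (String × Int) :=
  let remapped := PySem.Dict.ofList wallet_map
  (remap_chain.foldl (fun remapped remap =>
      remapped.items.foldl (fun next_map p =>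
          let target := (PySem.Dict.ofList remap).getD p.1 p.1
          next_map.insert target (next_map.getD target 0 + p.2))
        PySem.Dict.empty)
    remapped).items

-- ===== PORT B =====
def remap_wallet_py_alt (wallet_map : List (String × Int)) (remap_chain : List (List (String × String))) : List (String × Int) :=
  let walletD := PySem.Dict.ofList wallet_map
  let targets := walletD.keys.foldl (fun d c => d.insert c c) PySem.Dict.empty
  let targets := remap_chain.foldl (fun targets remap =>
      targets.items.foldl
        (fun d p => d.insert p.1 ((PySem.Dict.ofList remap).getD p.2 p.2))
        PySem.Dict.empty)
    targets
  let result := walletD.items.foldl (fun result p =>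
      let target := targets.getD p.1 p.1
      result.insert target (result.getD target 0 + p.2)) PySem.Dict.empty
  result.items

-- ===== PRECONDITION & SPEC =====
def Spec_remap_wallet_py (wallet_map : List (String × Int)) (remap_chain : List (List (String × String))) (out : List (String × Int)) : Prop := out = remap_wallet_py_alt wallet_map remap_chain
instance (wallet_map : List (String × Int)) (remap_chain : List (List (String × String))) (out : List (String × Int)) : Decidable (Spec_remap_wallet_py wallet_map remap_chain out) := by unfold Spec_remap_wallet_py; infer_instance

-- ===== CLAIM (what is proved, stated in full; the proofs are below) =====
def Claim_equal_remap_wallet_py : Prop := ∀ (wallet_map : List (String × Int)) (remap_chain : List (List (String × String))), Dom_remap_wallet_py wallet_map remap_chain → Spec_remap_wallet_py wallet_map remap_chain (remap_wallet_py wallet_map remap_chain)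

-- ===== LEMMAS AND PROOFS =====

-- single remap lookup: remap.get(c, c)
def pvLk (remap : List (String × String)) (c : String) : String :=
  (PySem.Dict.ofList remap).getD c c

-- the composed chain applied to one currency
def pvComp (chain : List (List (String × String))) (c : String) : String :=
  chain.foldl (fun c r => pvLk r c) c

-- group-and-sum of pairs under a key transformation f (the canonical semantics)
def pvG (f : String → String) (pairs : List (String × Int)) : PySem.Dict String Int :=
  pairs.foldl (fun d p => d.insert (f p.1) (d.getD (f p.1) 0 + p.2)) PySem.Dict.empty

-- total amount sent to key k
def pvS (f : String → String) (pairs : List (String × Int)) (k : String) : Int :=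
  ((pairs.filter (fun p => f p.1 == k)).map (·.2)).sum

theorem pvG_nodup (f : String → String) (pairs : List (String × Int)) :
    (pvG f pairs).keys.Nodup := by
  unfold pvG
  exact PySem.Dict.nodup_keys_foldl_insert_key pairs (fun p => f p.1)
    (fun d p => d.getD (f p.1) 0 + p.2) PySem.Dict.empty PySem.Dict.nodup_keys_empty

theorem pvG_keys (f : String → String) (pairs : List (String × Int)) :
    (pvG f pairs).keys = PySem.Set.ofList (pairs.map (fun p => f p.1)) := by
  unfold pvG
  rw [PySem.Dict.keys_foldl_insert_key]
  simp [PySem.Set.update_nil_left]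

theorem pvG_getD_aux (f : String → String) (pairs : List (String × Int))
    (d : PySem.Dict String Int) (k : String) :
    (pairs.foldl (fun d p => d.insert (f p.1) (d.getD (f p.1) 0 + p.2)) d).getD k 0
      = d.getD k 0 + pvS f pairs k := by
  induction pairs generalizing d with
  | nil => simp [pvS]
  | cons p pairs ih =>
    simp only [List.foldl_cons, ih, PySem.Dict.getD_insert, pvS, List.filter_cons]
    by_cases hk : f p.1 = k
    · simp [hk]; ring
    · simp [hk, Ne.symm hk]

theorem pvG_getD (f : String → String) (pairs : List (String × Int)) (k : String) :
    (pvG f pairs).getD k 0 = pvS f pairs k := by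
  unfold pvG
  rw [pvG_getD_aux]
  simp

theorem pvG_items (f : String → String) (pairs : List (String × Int)) :
    (pvG f pairs).items
      = (PySem.Set.ofList (pairs.map (fun p => f p.1))).map (fun k => (k, pvS f pairs k)) := by
  rw [PySem.Dict.items_eq_map_keys (pvG f pairs) (pvG_nodup f pairs) 0, pvG_keys]
  exact List.map_congr_left (fun k _ => by rw [pvG_getD])

-- dedup commutes with a map over the dedup
theorem pv_ofList_map_ofList (h : String → String) (l : List String) :
    PySem.Set.ofList ((PySem.Set.ofList l).map h) = PySem.Set.ofList (l.map h) := by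
  induction l using List.reverseRecOn with
  | nil => rfl
  | append_singleton l x ih =>
    rw [PySem.Set.ofList_append_singleton]
    simp only [List.map_append, List.map_cons, List.map_nil]
    by_cases hx : x ∈ PySem.Set.ofList l
    · rw [PySem.Set.add_of_mem hx, ih, PySem.Set.ofList_append_singleton,
        PySem.Set.add_of_mem]
      simp only [PySem.Set.mem_ofList] at hx ⊢
      exact List.mem_map_of_mem hx
    · rw [PySem.Set.add_of_not_mem hx, List.map_append, List.map_cons, List.map_nil,
        PySem.Set.ofList_append_singleton, PySem.Set.ofList_append_singleton, ih]

theorem pv_sum_single (D : List String) (hD : D.Nodup) (c0 : String) (a : Int) :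
    (D.map (fun c => if c0 == c then a else (0:Int))).sum = if c0 ∈ D then a else 0 := by
  induction D with
  | nil => simp
  | cons c D ih =>
    simp only [List.nodup_cons] at hD
    simp only [List.map_cons, List.sum_cons, ih hD.2, List.mem_cons]
    by_cases hc : c0 = c
    · subst hc
      simp [hD.1]
    · simp [hc]

theorem pvS_append (f : String → String) (pairs : List (String × Int)) (p : String × Int)
    (k : String) :
    pvS f (pairs ++ [p]) k = pvS f pairs k + (if f p.1 == k then p.2 else 0) := by
  unfold pvS
  rw [List.filter_append, List.map_append, List.sum_append]
  by_cases hp : (f p.1 == k) = true <;> simp [hp]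

theorem pvS_eq_zero (f : String → String) (pairs : List (String × Int)) (k : String)
    (hk : k ∉ pairs.map (fun p => f p.1)) : pvS f pairs k = 0 := by
  unfold pvS
  have h : pairs.filter (fun p => f p.1 == k) = [] := by
    refine List.filter_eq_nil_iff.mpr (fun p hp hb => hk ?_)
    exact List.mem_map.mpr ⟨p, hp, by simpa using hb⟩
  simp [h]

-- regrouped sums collapse
theorem pv_regroup_sum (f h : String → String) (pairs : List (String × Int)) (k : String) :
    (((PySem.Set.ofList (pairs.map (fun p => f p.1))).filter (fun c => h c == k)).map
        (fun c => pvS f pairs c)).sum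
      = pvS (fun c => h (f c)) pairs k := by
  induction pairs using List.reverseRecOn with
  | nil => simp [pvS]
  | append_singleton pairs p ih =>
    rw [pvS_append]
    simp only [List.map_append, List.map_cons, List.map_nil,
      PySem.Set.ofList_append_singleton]
    have hDnd : (PySem.Set.ofList (pairs.map (fun p => f p.1))).Nodup :=
      PySem.Set.nodup_ofList _
    by_cases hx : f p.1 ∈ PySem.Set.ofList (pairs.map (fun p => f p.1))
    · rw [PySem.Set.add_of_mem hx]
      calc (((PySem.Set.ofList (pairs.map (fun p => f p.1))).filter
              (fun c => h c == k)).map (fun c => pvS f (pairs ++ [p]) c)).sum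
          = (((PySem.Set.ofList (pairs.map (fun p => f p.1))).filter
              (fun c => h c == k)).map
              (fun c => pvS f pairs c + if f p.1 == c then p.2 else 0)).sum := by
            exact congrArg List.sum (List.map_congr_left (fun c _ => pvS_append f pairs p c))
        _ = pvS (fun c => h (f c)) pairs k + (if h (f p.1) == k then p.2 else 0) := by
            rw [PySem.List.sum_map_add_int, ih,
              pv_sum_single _ (hDnd.filter _) (f p.1) p.2]
            congr 1
            by_cases hh : (h (f p.1) == k) = true
            · simp [List.mem_filter, hx, hh]
            · simp [List.mem_filter, hh]
    · rw [PySem.Set.add_of_not_mem hx, List.filter_append, List.map_append, List.sum_append]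
      have h0 : pvS f pairs (f p.1) = 0 := by
        refine pvS_eq_zero f pairs (f p.1) (fun hm => hx ?_)
        simpa [pysem] using hm
      have h1 : (((PySem.Set.ofList (pairs.map (fun p => f p.1))).filter
            (fun c => h c == k)).map (fun c => pvS f (pairs ++ [p]) c)).sum
          = pvS (fun c => h (f c)) pairs k := by
        rw [← ih]
        refine congrArg List.sum (List.map_congr_left (fun c hc => ?_))
        rw [pvS_append]
        have hcD : c ∈ PySem.Set.ofList (pairs.map (fun p => f p.1)) :=
          (List.mem_filter.mp hc).1
        have hne : (f p.1 == c) = false := by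
          refine beq_eq_false_iff_ne.mpr (fun he => hx ?_)
          rw [he]; exact hcD
        simp [hne]
      rw [h1]
      congr 1
      by_cases hh : (h (f p.1) == k) = true
      · simp [hh, pvS_append, h0]
      · simp [hh]

-- pvS over the items of a grouped dict
theorem pvS_mapped (f h : String → String) (pairs : List (String × Int)) (k : String) :
    pvS h ((PySem.Set.ofList (pairs.map (fun p => f p.1))).map
        (fun c => (c, pvS f pairs c))) k
      = pvS (fun c => h (f c)) pairs k := by
  unfold pvS
  rw [List.filter_map, List.map_map]
  simp only [Function.comp_def]
  exact pv_regroup_sum f h pairs k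

-- grouping an already grouped dict regroups in one step
theorem pvG_regroup (h f : String → String) (pairs : List (String × Int)) :
    pvG h (pvG f pairs).items = pvG (fun c => h (f c)) pairs := by
  apply PySem.Dict.ext
  rw [pvG_items h _, pvG_items (fun c => h (f c)) pairs, pvG_items f pairs]
  simp only [List.map_map, Function.comp_def]
  rw [pv_ofList_map_ofList]
  simp only [List.map_map, Function.comp_def]
  refine List.map_congr_left (fun k _ => ?_)
  rw [pvS_mapped]

theorem pv_filter_key_single {α : Type} (l : List (String × α))
    (hl : (l.map Prod.fst).Nodup) (k : String) (v : α) (hm : (k, v) ∈ l) :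
    l.filter (fun p => p.1 == k) = [(k, v)] := by
  induction l with
  | nil => cases hm
  | cons q l ih =>
    simp only [List.map_cons, List.nodup_cons] at hl
    rcases List.mem_cons.mp hm with he | hm'
    · have hq : q = (k, v) := he.symm
      subst hq
      have hrest : l.filter (fun p => p.1 == k) = [] := by
        refine List.filter_eq_nil_iff.mpr (fun p hp hb => hl.1 ?_)
        have : p.1 = k := by simpa using hb
        exact this ▸ List.mem_map.mpr ⟨p, hp, rfl⟩
      simp [hrest]
    · have hne : (q.1 == k) = false := by
        refine beq_eq_false_iff_ne.mpr (fun he2 => hl.1 ?_)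
        have : k ∈ l.map Prod.fst := by
          exact List.mem_map.mpr ⟨(k, v), hm', rfl⟩
        exact he2 ▸ this
      simp only [List.filter_cons, hne, Bool.false_eq_true, if_false]
      exact ih hl.2 hm'

theorem pvG_id (d : PySem.Dict String Int) (hd : d.keys.Nodup) :
    pvG (fun c => c) d.items = d := by
  apply PySem.Dict.ext
  rw [pvG_items]
  have hkeys : d.items.map (fun p => p.1) = d.keys := rfl
  rw [hkeys, PySem.Set.ofList_eq_self_of_nodup d.keys hd]
  conv_rhs => rw [PySem.Dict.items_eq_map_keys d hd 0]
  refine List.map_congr_left (fun k hk => ?_)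
  have hmem : (k, d.getD k 0) ∈ d.items := by
    rw [PySem.Dict.items_eq_map_keys d hd 0]
    exact List.mem_map_of_mem hk
  have hnd' : (d.items.map Prod.fst).Nodup := hd
  unfold pvS
  rw [pv_filter_key_single d.items hnd' k (d.getD k 0) hmem]
  simp

-- A's chain fold is one grouped pass under the composed map
theorem pvA_fold (chain : List (List (String × String))) (f : String → String)
    (pairs : List (String × Int)) :
    chain.foldl (fun remapped remap =>
        remapped.items.foldl (fun next_map p =>
            let target := (PySem.Dict.ofList remap).getD p.1 p.1
            next_map.insert target (next_map.getD target 0 + p.2))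
          PySem.Dict.empty) (pvG f pairs)
      = pvG (fun c => pvComp chain (f c)) pairs := by
  induction chain generalizing f with
  | nil => rfl
  | cons R chain ih =>
    rw [List.foldl_cons]
    have h1 : (pvG f pairs).items.foldl (fun next_map p =>
          let target := (PySem.Dict.ofList R).getD p.1 p.1
          next_map.insert target (next_map.getD target 0 + p.2)) PySem.Dict.empty
        = pvG (fun c => pvLk R (f c)) pairs := pvG_regroup (pvLk R) f pairs
    rw [h1, ih]
    rfl

-- congruence of the grouped pass in the key transformation, over the pairs' own keys
theorem pvG_congr (f g : String → String) (pairs : List (String × Int))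
    (h : ∀ p ∈ pairs, f p.1 = g p.1) : pvG f pairs = pvG g pairs := by
  unfold pvG
  have hgen : ∀ (l : List (String × Int)), (∀ p ∈ l, f p.1 = g p.1) →
      ∀ (d : PySem.Dict String Int),
      l.foldl (fun d p => d.insert (f p.1) (d.getD (f p.1) 0 + p.2)) d
        = l.foldl (fun d p => d.insert (g p.1) (d.getD (g p.1) 0 + p.2)) d := by
    intro l
    induction l with
    | nil => intro _ d; rfl
    | cons q l ih =>
      intro hl d
      rw [List.foldl_cons, List.foldl_cons, hl q List.mem_cons_self]
      exact ih (fun r hr => hl r (List.mem_cons_of_mem q hr)) _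
  exact hgen pairs h PySem.Dict.empty

def pvStepC (targets : PySem.Dict String String) (remap : List (String × String)) :
    PySem.Dict String String :=
  targets.items.foldl
    (fun d p => d.insert p.1 ((PySem.Dict.ofList remap).getD p.2 p.2)) PySem.Dict.empty

-- invariant of B's targets dict: it realises the composed chain on the wallet's keys
theorem pvC_inv (chain : List (List (String × String))) (W : List String) (hW : W.Nodup) :
    (chain.foldl pvStepC (W.foldl (fun d c => d.insert c c) PySem.Dict.empty)).keys = W ∧
    ∀ c ∈ W,
      (chain.foldl pvStepC (W.foldl (fun d c => d.insert c c) PySem.Dict.empty)).get? c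
        = some (pvComp chain c) := by
  induction chain using List.reverseRecOn with
  | nil =>
    simp only [List.foldl_nil]
    have hfresh : ∀ a ∈ W, (PySem.Dict.empty : PySem.Dict String String).contains a = false :=
      fun a _ => PySem.Dict.contains_empty a
    have hitems : (W.foldl (fun d c => d.insert c c) PySem.Dict.empty).items
        = W.map (fun c => (c, c)) := by
      have h := PySem.Dict.items_foldl_insert_fresh W (fun c => c) (fun c => c)
        PySem.Dict.empty hfresh (by simpa using hW)
      exact h
    have hkeys : (W.foldl (fun d c => d.insert c c) PySem.Dict.empty).keys = W := by
      show (W.foldl (fun d c => d.insert c c) PySem.Dict.empty).items.map (fun p => p.1) = W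
      rw [hitems, List.map_map]
      simp [Function.comp_def]
    refine ⟨hkeys, fun c hc => ?_⟩
    refine PySem.Dict.get?_of_mem_items _ ?_ (by rw [hkeys]; exact hW)
    rw [hitems]
    exact List.mem_map_of_mem hc
  | append_singleton chain R ih =>
    obtain ⟨hkeys, hget⟩ := ih
    have hnd : (chain.foldl pvStepC (W.foldl (fun d c => d.insert c c)
        PySem.Dict.empty)).keys.Nodup := by rw [hkeys]; exact hW
    set T := chain.foldl pvStepC (W.foldl (fun d c => d.insert c c) PySem.Dict.empty) with hT
    have hfold : (chain ++ [R]).foldl pvStepC (W.foldl (fun d c => d.insert c c)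
        PySem.Dict.empty) = pvStepC T R := by
      rw [List.foldl_append]; rfl
    have hfresh : ∀ a ∈ T.items,
        (PySem.Dict.empty : PySem.Dict String String).contains a.1 = false :=
      fun a _ => PySem.Dict.contains_empty a.1
    have hitems : (pvStepC T R).items
        = T.items.map (fun p => (p.1, (PySem.Dict.ofList R).getD p.2 p.2)) := by
      unfold pvStepC
      rw [PySem.Dict.items_foldl_insert_fresh T.items Prod.fst
        (fun p => (PySem.Dict.ofList R).getD p.2 p.2) PySem.Dict.empty hfresh hnd]
      rfl
    have hkeys' : (pvStepC T R).keys = T.keys := by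
      show (pvStepC T R).items.map (fun p => p.1) = T.items.map (fun p => p.1)
      rw [hitems, List.map_map]
      rfl
    have hcomp : ∀ c, pvComp (chain ++ [R]) c = pvLk R (pvComp chain c) := by
      intro c; simp [pvComp, List.foldl_append, pvLk]
    refine ⟨?_, fun c hc => ?_⟩
    · rw [hfold, hkeys', hT, hkeys]
    · rw [hfold]
      have hm := PySem.Dict.mem_items_of_get?_eq_some T (hget c hc)
      have hm1 : (c, pvLk R (pvComp chain c)) ∈ (pvStepC T R).items := by
        rw [hitems]
        exact List.mem_map_of_mem hm
      rw [PySem.Dict.get?_of_mem_items _ hm1 (by rw [hkeys', hT, hkeys]; exact hW), hcomp c]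

-- ===== VERDICT (by name: the statement is the Claim_ definition above) =====
theorem remap_wallet_py_spec : Claim_equal_remap_wallet_py := by
  intro wallet_map remap_chain _
  unfold Spec_remap_wallet_py
  have hnd : (PySem.Dict.ofList wallet_map).keys.Nodup :=
    PySem.Dict.nodup_keys_ofList wallet_map
  have hA : remap_chain.foldl (fun remapped remap =>
        remapped.items.foldl (fun next_map p =>
            let target := (PySem.Dict.ofList remap).getD p.1 p.1
            next_map.insert target (next_map.getD target 0 + p.2))
          PySem.Dict.empty) (PySem.Dict.ofList wallet_map)
      = pvG (fun c => pvComp remap_chain c) (PySem.Dict.ofList wallet_map).items := by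
    have h0 := pvA_fold remap_chain (fun c => c) (PySem.Dict.ofList wallet_map).items
    rw [pvG_id _ hnd] at h0
    exact h0
  have hB2 : pvG (fun c => (remap_chain.foldl pvStepC
          ((PySem.Dict.ofList wallet_map).keys.foldl (fun d c => d.insert c c)
            PySem.Dict.empty)).getD c c)
        (PySem.Dict.ofList wallet_map).items
      = pvG (fun c => pvComp remap_chain c) (PySem.Dict.ofList wallet_map).items := by
    obtain ⟨hkeys, hget⟩ := pvC_inv remap_chain (PySem.Dict.ofList wallet_map).keys hnd
    refine pvG_congr _ _ _ (fun p hp => ?_)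
    have hck : p.1 ∈ (PySem.Dict.ofList wallet_map).keys := List.mem_map_of_mem hp
    rw [PySem.Dict.getD_eq_get?_getD, hget p.1 hck]
    rfl
  exact congrArg PySem.Dict.items (hA.trans hB2.symm)
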